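-- pv_equiv track=rewrite | github.com/MaxMotovilov/allennlp | allennlp/commands/mp_predict.py | top_spans
-- ===== SOURCE A (Python) =====
-- def uniquePar():
--     s = set()
--     def test( item ):
--         if item[1] in s: return False
--         s.add( item[1] )
--         return True
--     return test
--
-- def top_spans( starts, ends, n ):
-- # O( N log N ) where N = Np * Lp * (Lp-1) / 2
--     assert len(starts) == len(ends)
--     return list(filter(
--                uniquePar(),
--                sorted((
--                   (starts[p][i] + ends[p][j], p, i, j)
--                     for p in range(len(starts))
--                       for i in range(len(starts[p])-1)
--                         for j in range(i+1, len(ends[p]))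
--                ), reverse=True)
--             ))[:n]
-- ===== SOURCE B (Python) =====
-- def top_spans(starts, ends, n):
--     # Per-paragraph best span via a single backward scan (running suffix-max of ends),
--     # then sort the per-paragraph maxima; O(sum Lp + Np log Np) instead of sorting all pairs.
--     assert len(starts) == len(ends)
--     best = []
--     for p in range(len(starts)):
--         ss = starts[p]
--         es = ends[p]
--         if len(ss) >= 2 and len(es) >= 2:
--             bv, bj = es[len(es) - 1], len(es) - 1
--             bs = None
--             for i in range(len(es) - 2, -1, -1):
--                 if i <= len(ss) - 2:
--                     cand = (ss[i] + bv, i, bj)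
--                     if bs is None or cand > bs:
--                         bs = cand
--                 if es[i] > bv:
--                     bv, bj = es[i], i
--             if bs is not None:
--                 best.append((bs[0], p, bs[1], bs[2]))
--     best.sort(reverse=True)
--     return best[:n]
-- ===== Notes on version B (the rewrite author's own statement) =====
-- stated objective: faster
-- what changed: Instead of generating, sorting and first-per-paragraph-filtering all O(L^2) candidate spans of every paragraph, B computes each paragraph's single best span in one backward scan that carries a running suffix-maximum of the end scores (ties resolved to the larger index, reproducing A's reverse-sort tie-break), and then sorts only the per-paragraph maxima.
import Mathlib
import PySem

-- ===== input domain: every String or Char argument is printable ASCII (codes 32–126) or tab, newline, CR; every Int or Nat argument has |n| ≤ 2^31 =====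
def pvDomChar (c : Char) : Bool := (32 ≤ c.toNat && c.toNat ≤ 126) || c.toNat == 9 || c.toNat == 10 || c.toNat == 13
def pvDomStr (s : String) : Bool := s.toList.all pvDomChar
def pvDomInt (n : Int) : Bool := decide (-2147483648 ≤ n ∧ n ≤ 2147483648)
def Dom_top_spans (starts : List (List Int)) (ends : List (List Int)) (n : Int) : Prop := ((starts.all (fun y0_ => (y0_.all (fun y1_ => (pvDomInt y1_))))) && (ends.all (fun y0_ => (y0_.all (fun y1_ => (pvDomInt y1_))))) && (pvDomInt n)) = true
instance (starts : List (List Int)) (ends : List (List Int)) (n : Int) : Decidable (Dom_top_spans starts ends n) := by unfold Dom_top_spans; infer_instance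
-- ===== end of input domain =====

-- B replaces A's global sort of all O(L^2) spans per paragraph by a per-paragraph backward
-- scan keeping a running suffix-max of the ends, then sorts only the per-paragraph maxima
-- (objective: faster, asymptotically fewer candidates to sort).

-- ===== PORT A =====
-- Python compares the 4-tuples lexicographically; pvKey4 realizes that order via Prod.Lex.
def pvKey4 (t : Int × Int × Int × Int) : Int ×ₗ Int ×ₗ Int ×ₗ Int :=
  toLex (t.1, toLex (t.2.1, toLex (t.2.2.1, t.2.2.2)))

-- the triple generator of A: (starts[p][i] + ends[p][j], p, i, j)
def pvTuplesA (starts ends : List (List Int)) : List (Int × Int × Int × Int) :=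
  (PySem.List.pyRange 0 (starts.length : Int) 1).flatMap (fun p =>
    (PySem.List.pyRange 0 (((PySem.List.pyGetD starts p []).length : Int) - 1) 1).flatMap (fun i =>
      (PySem.List.pyRange (i + 1) ((PySem.List.pyGetD ends p []).length : Int) 1).map (fun j =>
        (PySem.List.pyGetD (PySem.List.pyGetD starts p []) i 0 +
           PySem.List.pyGetD (PySem.List.pyGetD ends p []) j 0, p, i, j))))

-- list(filter(uniquePar(), …)): a fold carrying the closure's set s and the kept elements
def pvFilterStep (st : PySem.Set Int × List (Int × Int × Int × Int))
    (t : Int × Int × Int × Int) : PySem.Set Int × List (Int × Int × Int × Int) :=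
  if PySem.Set.contains st.1 t.2.1 then st else (PySem.Set.add st.1 t.2.1, st.2 ++ [t])

def top_spans (starts : List (List Int)) (ends : List (List Int)) (n : Int) :
    List (Int × Int × Int × Int) :=
  PySem.List.slice
    (((PySem.List.sorted (pvTuplesA starts ends) pvKey4 true).foldl pvFilterStep
        (PySem.Set.empty, [])).2)
    none (some n)

-- ===== PORT B =====
-- Python compares the triples (score, i, j) lexicographically
def pvKey3 (t : Int × Int × Int) : Int ×ₗ Int ×ₗ Int :=
  toLex (t.1, toLex (t.2.1, t.2.2))

-- body of 'for i in range(len(es)-2, -1, -1)': state (bv, bj, bs)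
def pvScanStep (ss es : List Int) (st : Int × Int × Option (Int × Int × Int)) (i : Int) :
    Int × Int × Option (Int × Int × Int) :=
  let st1 :=
    if i ≤ (ss.length : Int) - 2 then
      let cand := (PySem.List.pyGetD ss i 0 + st.1, i, st.2.1)
      match st.2.2 with
      | none => (st.1, st.2.1, some cand)
      | some b => if pvKey3 b < pvKey3 cand then (st.1, st.2.1, some cand) else st
    else st
  if st1.1 < PySem.List.pyGetD es i 0 then (PySem.List.pyGetD es i 0, i, st1.2.2) else st1

-- body of 'for p in range(len(starts))'
def pvParaStep (starts ends : List (List Int)) (best : List (Int × Int × Int × Int))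
    (p : Int) : List (Int × Int × Int × Int) :=
  let ss := PySem.List.pyGetD starts p []
  let es := PySem.List.pyGetD ends p []
  if 2 ≤ ss.length ∧ 2 ≤ es.length then
    let st := (PySem.List.pyRange ((es.length : Int) - 2) (-1) (-1)).foldl (pvScanStep ss es)
      (PySem.List.pyGetD es ((es.length : Int) - 1) 0, (es.length : Int) - 1, none)
    match st.2.2 with
    | some b => best ++ [(b.1, p, b.2.1, b.2.2)]
    | none => best
  else best

def top_spans_alt (starts : List (List Int)) (ends : List (List Int)) (n : Int) :
    List (Int × Int × Int × Int) :=
  let best := (PySem.List.pyRange 0 (starts.length : Int) 1).foldl (pvParaStep starts ends) []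
  PySem.List.slice (PySem.List.sorted best pvKey4 true) none (some n)

-- ===== PRECONDITION & SPEC =====
-- Pre_ excludes exactly the inputs where A's 'assert len(starts) == len(ends)' raises AssertionError.
def Pre_top_spans (starts : List (List Int)) (ends : List (List Int)) (n : Int) : Prop :=
  starts.length = ends.length
instance (starts : List (List Int)) (ends : List (List Int)) (n : Int) :
    Decidable (Pre_top_spans starts ends n) := by unfold Pre_top_spans; infer_instance

def pvWitness_top_spans : List (List Int) × List (List Int) × Int := ([[1, 2], [5]], [[3, 4], [6]], 1)

def Spec_top_spans (starts : List (List Int)) (ends : List (List Int)) (n : Int) (out : List (Int × Int × Int × Int)) : Prop := out = top_spans_alt starts ends n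
instance (starts : List (List Int)) (ends : List (List Int)) (n : Int) (out : List (Int × Int × Int × Int)) : Decidable (Spec_top_spans starts ends n out) := by unfold Spec_top_spans; infer_instance

-- ===== CLAIM (what is proved, stated in full; the proofs are below) =====
def Claim_equal_top_spans : Prop := ∀ (starts : List (List Int)) (ends : List (List Int)) (n : Int), Dom_top_spans starts ends n → Pre_top_spans starts ends n → Spec_top_spans starts ends n (top_spans starts ends n)


-- ===== LEMMAS AND PROOFS =====

-- Per-paragraph candidate list (A's two inner loops, without the paragraph tag)
def pvPairs (ss es : List Int) : List (Int × Int × Int) :=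
  (PySem.List.pyRange 0 ((ss.length : Int) - 1) 1).flatMap (fun i =>
    (PySem.List.pyRange (i + 1) ((es.length : Int)) 1).map (fun j =>
      (PySem.List.pyGetD ss i 0 + PySem.List.pyGetD es j 0, i, j)))

def pvAddP (p : Int) (m : Int × Int × Int) : Int × Int × Int × Int := (m.1, p, m.2.1, m.2.2)

def pvIsMax3 (l : List (Int × Int × Int)) (m : Int × Int × Int) : Prop :=
  m ∈ l ∧ ∀ x ∈ l, pvKey3 x ≤ pvKey3 m

lemma pvKey3_inj (a b : Int × Int × Int) (h : pvKey3 a = pvKey3 b) : a = b := by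
  obtain ⟨a1, a2, a3⟩ := a; obtain ⟨b1, b2, b3⟩ := b
  simp [pvKey3] at h
  simp [h.1, h.2.1, h.2.2]

lemma pvKey4_inj (a b : Int × Int × Int × Int) (h : pvKey4 a = pvKey4 b) : a = b := by
  obtain ⟨a1, a2, a3, a4⟩ := a; obtain ⟨b1, b2, b3, b4⟩ := b
  simp [pvKey4] at h
  simp [h.1, h.2.1, h.2.2.1, h.2.2.2]

lemma pvIsMax3_unique (l : List (Int × Int × Int)) (m m' : Int × Int × Int)
    (h : pvIsMax3 l m) (h' : pvIsMax3 l m') : m = m' := by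
  exact pvKey3_inj m m' (le_antisymm (h'.2 m h.1) (h.2 m' h'.1))

lemma mem_pvPairs (ss es : List Int) (t : Int × Int × Int) :
    t ∈ pvPairs ss es ↔ ∃ i j : Int, 0 ≤ i ∧ i < (ss.length : Int) - 1 ∧
      i + 1 ≤ j ∧ j < (es.length : Int) ∧
      t = (PySem.List.pyGetD ss i 0 + PySem.List.pyGetD es j 0, i, j) := by
  simp [pvPairs, List.mem_flatMap, List.mem_map, PySem.List.mem_pyRange_one]
  aesop

lemma pvPairs_nil (ss es : List Int) (h : ss.length < 2 ∨ es.length < 2) :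
    pvPairs ss es = [] := by
  rw [List.eq_nil_iff_forall_not_mem]
  intro t ht
  obtain ⟨i, j, hi0, hi1, hj0, hj1, -⟩ := (mem_pvPairs ss es t).mp ht
  omega

lemma pvPairs_ne_nil (ss es : List Int) (h2 : 2 ≤ ss.length) (h2' : 2 ≤ es.length) :
    (PySem.List.pyGetD ss 0 0 + PySem.List.pyGetD es 1 0, 0, 1) ∈ pvPairs ss es := by
  rw [mem_pvPairs]
  exact ⟨0, 1, by omega, by omega, by omega, by omega, rfl⟩

lemma pvTuplesA_eq (starts ends : List (List Int)) :
    pvTuplesA starts ends = (PySem.List.pyRange 0 (starts.length : Int) 1).flatMap (fun p =>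
      (pvPairs (PySem.List.pyGetD starts p []) (PySem.List.pyGetD ends p [])).map (pvAddP p)) := by
  simp [pvTuplesA, pvPairs, List.map_flatMap, List.map_map, Function.comp_def, pvAddP]

lemma mem_pvTuplesA (starts ends : List (List Int)) (t : Int × Int × Int × Int) :
    t ∈ pvTuplesA starts ends ↔ ∃ p : Int, 0 ≤ p ∧ p < (starts.length : Int) ∧
      ∃ m ∈ pvPairs (PySem.List.pyGetD starts p []) (PySem.List.pyGetD ends p []),
        t = pvAddP p m := by
  rw [pvTuplesA_eq]
  simp only [List.mem_flatMap, List.mem_map, PySem.List.mem_pyRange_one]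
  constructor
  · rintro ⟨p, ⟨h0, h1⟩, m, hm, rfl⟩; exact ⟨p, h0, h1, m, hm, rfl⟩
  · rintro ⟨p, h0, h1, m, hm, rfl⟩; exact ⟨p, ⟨h0, h1⟩, m, hm, rfl⟩

lemma pvKey4_le_iff (p : Int) (m m' : Int × Int × Int) :
    pvKey4 (pvAddP p m') ≤ pvKey4 (pvAddP p m) ↔ pvKey3 m' ≤ pvKey3 m := by
  obtain ⟨a1,a2,a3⟩ := m'; obtain ⟨b1,b2,b3⟩ := m
  simp [pvKey4, pvKey3, pvAddP, Prod.Lex.toLex_le_toLex]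

-- generic: a flatMap whose pieces are tagged by the index is Nodup
lemma pvNodup_flatMap {α β : Type} (l : List α) (f : α → List β) (tag : β → α)
    (hl : l.Nodup) (hf : ∀ a, (f a).Nodup) (ht : ∀ a ∈ l, ∀ x ∈ f a, tag x = a) :
    (l.flatMap f).Nodup := by
  induction l with
  | nil => simp
  | cons a l ih =>
    rw [List.flatMap_cons, List.nodup_append]
    refine ⟨hf a, ih (List.nodup_cons.mp hl).2 (fun b hb x hx => ht b (List.mem_cons_of_mem a hb) x hx), ?_⟩
    intro x hx y hy
    obtain ⟨b, hb, hyb⟩ := List.mem_flatMap.mp hy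
    rintro rfl
    have h1 := ht a (List.mem_cons_self) x hx
    have h2 := ht b (List.mem_cons_of_mem a hb) x hyb
    exact (List.nodup_cons.mp hl).1 (h1 ▸ h2 ▸ hb)

lemma pvPairs_nodup (ss es : List Int) : (pvPairs ss es).Nodup := by
  apply pvNodup_flatMap _ _ (fun t => t.2.1) (PySem.List.nodup_pyRange_one _ _)
  · intro i
    exact (PySem.List.nodup_pyRange_one _ _).map (fun j j' h => by simpa using congrArg (fun t => t.2.2) h)
  · intro i _ x hx
    obtain ⟨j, -, rfl⟩ := List.mem_map.mp hx
    rfl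

lemma pvTuplesA_nodup (starts ends : List (List Int)) : (pvTuplesA starts ends).Nodup := by
  rw [pvTuplesA_eq]
  apply pvNodup_flatMap _ _ (fun t => t.2.1) (PySem.List.nodup_pyRange_one _ _)
  · intro p
    exact (pvPairs_nodup _ _).map (fun m m' h => by
      obtain ⟨a1,a2,a3⟩ := m; obtain ⟨b1,b2,b3⟩ := m'
      simpa [pvAddP] using h)
  · intro p _ x hx
    obtain ⟨m, -, rfl⟩ := List.mem_map.mp hx
    rfl

-- ===== B-side: the backward-scan invariant =====

def pvEInv (es : List Int) (a bv bj : Int) : Prop :=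
  a < bj ∧ bj < (es.length : Int) ∧ PySem.List.pyGetD es bj 0 = bv ∧
  (∀ j : Int, a < j → j < (es.length : Int) → PySem.List.pyGetD es j 0 ≤ bv) ∧
  (∀ j : Int, bj < j → j < (es.length : Int) → PySem.List.pyGetD es j 0 < bv)

def pvBInv (ss es : List Int) (a : Int) (bs : Option (Int × Int × Int)) : Prop :=
  match bs with
  | none => ∀ x ∈ pvPairs ss es, x.2.1 ≤ a
  | some m => m ∈ pvPairs ss es ∧ a < m.2.1 ∧
      ∀ x ∈ pvPairs ss es, a < x.2.1 → pvKey3 x ≤ pvKey3 m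

lemma pvKey3_le_iff (x y : Int × Int × Int) : pvKey3 x ≤ pvKey3 y ↔
    x.1 < y.1 ∨ x.1 = y.1 ∧ (x.2.1 < y.2.1 ∨ x.2.1 = y.2.1 ∧ x.2.2 ≤ y.2.2) := by
  obtain ⟨a1,a2,a3⟩ := x; obtain ⟨b1,b2,b3⟩ := y
  simp [pvKey3, Prod.Lex.toLex_le_toLex]

lemma pvPairs_bounds (ss es : List Int) (x : Int × Int × Int) (h : x ∈ pvPairs ss es) :
    0 ≤ x.2.1 ∧ x.2.1 ≤ (ss.length : Int) - 2 ∧ x.2.1 + 1 ≤ x.2.2 ∧ x.2.2 < (es.length : Int) := by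
  obtain ⟨i, j, hi0, hi1, hj0, hj1, rfl⟩ := (mem_pvPairs ss es x).mp h
  simp; omega

lemma pvPairs_row (ss es : List Int) (a : Int) (x : Int × Int × Int)
    (h : x ∈ pvPairs ss es) (hx : x.2.1 = a) :
    ∃ j : Int, a + 1 ≤ j ∧ j < (es.length : Int) ∧
      x = (PySem.List.pyGetD ss a 0 + PySem.List.pyGetD es j 0, a, j) := by
  obtain ⟨i, j, hi0, hi1, hj0, hj1, rfl⟩ := (mem_pvPairs ss es x).mp h
  simp at hx
  subst hx
  exact ⟨j, hj0, hj1, rfl⟩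

lemma pvStep_inv (ss es : List Int) (a : Int) (st : Int × Int × Option (Int × Int × Int))
    (h0 : 0 ≤ a) (h2 : a ≤ (es.length : Int) - 2)
    (hE : pvEInv es a st.1 st.2.1) (hB : pvBInv ss es a st.2.2) :
    pvEInv es (a - 1) (pvScanStep ss es st a).1 (pvScanStep ss es st a).2.1 ∧
      pvBInv ss es (a - 1) (pvScanStep ss es st a).2.2 := by
  obtain ⟨bv, bj, bs⟩ := st
  obtain ⟨hbj1, hbj2, hbjv, hle, hstrict⟩ := hE
  simp only at hbj1 hbj2 hbjv hle hstrict hB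
  have hEnew : bv < PySem.List.pyGetD es a 0 → pvEInv es (a - 1) (PySem.List.pyGetD es a 0) a := by
    intro hlt
    refine ⟨by omega, by omega, rfl, ?_, ?_⟩
    · intro j hj1 hj2
      rcases eq_or_lt_of_le (show a ≤ j by omega) with h | h
      · rw [← h]
      · exact le_of_lt (lt_of_le_of_lt (hle j h hj2) hlt)
    · intro j hj1 hj2
      exact lt_of_le_of_lt (hle j (by omega) hj2) hlt
  have hEkeep : ¬ bv < PySem.List.pyGetD es a 0 → pvEInv es (a - 1) bv bj := by
    intro hlt
    refine ⟨by omega, hbj2, hbjv, ?_, fun j hj1 hj2 => hstrict j hj1 hj2⟩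
    intro j hj1 hj2
    rcases eq_or_lt_of_le (show a ≤ j by omega) with h | h
    · rw [← h]; exact not_lt.mp hlt
    · exact hle j h hj2
  by_cases hg : a ≤ (ss.length : Int) - 2
  · -- the row i = a exists; the candidate is the best pair of that row
    have hcand_mem : (PySem.List.pyGetD ss a 0 + bv, a, bj) ∈ pvPairs ss es := by
      rw [mem_pvPairs]
      exact ⟨a, bj, h0, by omega, by omega, hbj2, by rw [hbjv]⟩
    have hrow : ∀ x ∈ pvPairs ss es, x.2.1 = a →
        pvKey3 x ≤ pvKey3 (PySem.List.pyGetD ss a 0 + bv, a, bj) := by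
      intro x hx hxa
      obtain ⟨j, hj1, hj2, rfl⟩ := pvPairs_row ss es a x hx hxa
      have h1 : PySem.List.pyGetD es j 0 ≤ bv := hle j (by omega) hj2
      have h2 : bj < j → PySem.List.pyGetD es j 0 < bv := fun h => hstrict j h hj2
      rw [pvKey3_le_iff]; simp; omega
    cases bs with
    | none =>
      have hred : pvScanStep ss es (bv, bj, none) a =
          if bv < PySem.List.pyGetD es a 0
          then (PySem.List.pyGetD es a 0, a, some (PySem.List.pyGetD ss a 0 + bv, a, bj))
          else (bv, bj, some (PySem.List.pyGetD ss a 0 + bv, a, bj)) := by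
        simp [pvScanStep, hg]
      have hBmid : pvBInv ss es (a - 1) (some (PySem.List.pyGetD ss a 0 + bv, a, bj)) := by
        refine ⟨hcand_mem, by simp, ?_⟩
        intro x hx hgt
        exact hrow x hx (by have := hB x hx; omega)
      rw [hred]
      by_cases hlt : bv < PySem.List.pyGetD es a 0
      · rw [if_pos hlt]; exact ⟨hEnew hlt, hBmid⟩
      · rw [if_neg hlt]; exact ⟨hEkeep hlt, hBmid⟩
    | some m =>
      obtain ⟨hm_mem, hm_gt, hm_dom⟩ := hB
      by_cases hc : pvKey3 m < pvKey3 (PySem.List.pyGetD ss a 0 + bv, a, bj)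
      · have hred : pvScanStep ss es (bv, bj, some m) a =
            if bv < PySem.List.pyGetD es a 0
            then (PySem.List.pyGetD es a 0, a, some (PySem.List.pyGetD ss a 0 + bv, a, bj))
            else (bv, bj, some (PySem.List.pyGetD ss a 0 + bv, a, bj)) := by
          simp [pvScanStep, hg, hc]
        have hBmid : pvBInv ss es (a - 1) (some (PySem.List.pyGetD ss a 0 + bv, a, bj)) := by
          refine ⟨hcand_mem, by simp, ?_⟩
          intro x hx hgt
          rcases eq_or_lt_of_le (show a ≤ x.2.1 by omega) with h | h
          · exact hrow x hx h.symm
          · exact le_of_lt (lt_of_le_of_lt (hm_dom x hx h) hc)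
        rw [hred]
        by_cases hlt : bv < PySem.List.pyGetD es a 0
        · rw [if_pos hlt]; exact ⟨hEnew hlt, hBmid⟩
        · rw [if_neg hlt]; exact ⟨hEkeep hlt, hBmid⟩
      · have hred : pvScanStep ss es (bv, bj, some m) a =
            if bv < PySem.List.pyGetD es a 0
            then (PySem.List.pyGetD es a 0, a, some m)
            else (bv, bj, some m) := by
          simp [pvScanStep, hg, hc]
        have hBmid : pvBInv ss es (a - 1) (some m) := by
          refine ⟨hm_mem, by omega, ?_⟩
          intro x hx hgt
          rcases eq_or_lt_of_le (show a ≤ x.2.1 by omega) with h | h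
          · exact le_trans (hrow x hx h.symm) (not_lt.mp hc)
          · exact hm_dom x hx h
        rw [hred]
        by_cases hlt : bv < PySem.List.pyGetD es a 0
        · rw [if_pos hlt]; exact ⟨hEnew hlt, hBmid⟩
        · rw [if_neg hlt]; exact ⟨hEkeep hlt, hBmid⟩
  · -- no row i = a: bs is unchanged
    have hred : pvScanStep ss es (bv, bj, bs) a =
        if bv < PySem.List.pyGetD es a 0
        then (PySem.List.pyGetD es a 0, a, bs)
        else (bv, bj, bs) := by
      cases bs <;> simp [pvScanStep, hg]
    have hBmid : pvBInv ss es (a - 1) bs := by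
      cases bs with
      | none =>
        intro x hx
        have := (pvPairs_bounds ss es x hx).2.1
        omega
      | some m =>
        obtain ⟨hm_mem, hm_gt, hm_dom⟩ := hB
        refine ⟨hm_mem, by omega, ?_⟩
        intro x hx hgt
        have hb := (pvPairs_bounds ss es x hx).2.1
        exact hm_dom x hx (by omega)
    rw [hred]
    by_cases hlt : bv < PySem.List.pyGetD es a 0
    · rw [if_pos hlt]; exact ⟨hEnew hlt, hBmid⟩
    · rw [if_neg hlt]; exact ⟨hEkeep hlt, hBmid⟩

lemma pvScan_inv (ss es : List Int) : ∀ (k : Nat) (a : Int) (st : Int × Int × Option (Int × Int × Int)),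
    a + 1 = (k : Int) → a ≤ (es.length : Int) - 2 →
    pvEInv es a st.1 st.2.1 → pvBInv ss es a st.2.2 →
    pvBInv ss es (-1) (((PySem.List.pyRange a (-1) (-1)).foldl (pvScanStep ss es) st).2.2) := by
  intro k
  induction k with
  | zero =>
    intro a st hk _ _ hB
    rw [PySem.List.pyRange_neg_one_eq_nil (show a ≤ -1 by omega)]
    simpa using (show a = -1 by omega) ▸ hB
  | succ k ih =>
    intro a st hk h2 hE hB
    rw [PySem.List.pyRange_neg_one_cons (show -1 < a by omega), List.foldl_cons]
    obtain ⟨hE', hB'⟩ := pvStep_inv ss es a st (by omega) h2 hE hB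
    exact ih (a - 1) (pvScanStep ss es st a) (by omega) (by omega) hE' hB'

lemma pvPara_best (ss es : List Int) (h2 : 2 ≤ ss.length) (h2' : 2 ≤ es.length) :
    ∃ m, (((PySem.List.pyRange ((es.length : Int) - 2) (-1) (-1)).foldl (pvScanStep ss es)
        (PySem.List.pyGetD es ((es.length : Int) - 1) 0, (es.length : Int) - 1, none)).2.2) = some m ∧
      pvIsMax3 (pvPairs ss es) m := by
  have hE : pvEInv es ((es.length : Int) - 2)
      (PySem.List.pyGetD es ((es.length : Int) - 1) 0) ((es.length : Int) - 1) := by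
    refine ⟨by omega, by omega, rfl, ?_, by intro j hj1 hj2; omega⟩
    intro j hj1 hj2
    have : j = (es.length : Int) - 1 := by omega
    rw [this]
  have hB : pvBInv ss es ((es.length : Int) - 2) none := by
    intro x hx
    have := (pvPairs_bounds ss es x hx).2.2
    omega
  have hfin := pvScan_inv ss es ((es.length : Int) - 1).toNat ((es.length : Int) - 2)
    (PySem.List.pyGetD es ((es.length : Int) - 1) 0, (es.length : Int) - 1, none)
    (by omega) (by omega) hE hB
  rcases hres : (((PySem.List.pyRange ((es.length : Int) - 2) (-1) (-1)).foldl (pvScanStep ss es)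
      (PySem.List.pyGetD es ((es.length : Int) - 1) 0, (es.length : Int) - 1, none)).2.2) with - | m
  · rw [hres] at hfin
    exact absurd (hfin _ (pvPairs_ne_nil ss es h2 h2')) (by simp)
  · rw [hres] at hfin
    obtain ⟨hmem, -, hdom⟩ := hfin
    refine ⟨m, rfl, hmem, ?_⟩
    intro x hx
    exact hdom x hx (by have := (pvPairs_bounds ss es x hx).1; omega)

-- what one iteration of B's paragraph loop appends
def pvEmit (starts ends : List (List Int)) (p : Int) : List (Int × Int × Int × Int) :=
  let ss := PySem.List.pyGetD starts p []
  let es := PySem.List.pyGetD ends p []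
  if 2 ≤ ss.length ∧ 2 ≤ es.length then
    match (((PySem.List.pyRange ((es.length : Int) - 2) (-1) (-1)).foldl (pvScanStep ss es)
        (PySem.List.pyGetD es ((es.length : Int) - 1) 0, (es.length : Int) - 1, none)).2.2) with
    | some b => [pvAddP p b]
    | none => []
  else []

lemma pvParaStep_eq (starts ends : List (List Int)) (best : List (Int × Int × Int × Int)) (p : Int) :
    pvParaStep starts ends best p = best ++ pvEmit starts ends p := by
  simp only [pvParaStep, pvEmit]
  split_ifs with h
  · split <;> simp [pvAddP]
  · simp

lemma mem_pvEmit (starts ends : List (List Int)) (p : Int) (t : Int × Int × Int × Int) :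
    t ∈ pvEmit starts ends p ↔
      ∃ m, pvIsMax3 (pvPairs (PySem.List.pyGetD starts p []) (PySem.List.pyGetD ends p [])) m ∧
        t = pvAddP p m := by
  simp only [pvEmit]
  split_ifs with h
  · obtain ⟨m0, hm0, hmax⟩ := pvPara_best _ _ h.1 h.2
    rw [hm0]
    simp only [List.mem_singleton]
    constructor
    · rintro rfl; exact ⟨m0, hmax, rfl⟩
    · rintro ⟨m, hm, rfl⟩; rw [pvIsMax3_unique _ m m0 hm hmax]
  · simp only [List.not_mem_nil, false_iff, not_exists, not_and]
    intro m hm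
    rw [pvPairs_nil _ _ (by omega)] at hm
    exact fun _ => List.not_mem_nil hm.1

-- ===== A-side: the stateful first-per-paragraph filter =====

lemma pvFilter_char : ∀ (l : List (Int × Int × Int × Int)),
    l.Pairwise (fun a b => pvKey4 b < pvKey4 a) →
    ∀ (s : PySem.Set Int) (acc : List (Int × Int × Int × Int)),
    ∃ g, (l.foldl pvFilterStep (s, acc)).2 = acc ++ g ∧ g.Sublist l ∧
      (∀ t, t ∈ g ↔ t ∈ l ∧ t.2.1 ∉ s ∧ ∀ x ∈ l, x.2.1 = t.2.1 → pvKey4 x ≤ pvKey4 t) := by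
  intro l
  induction l with
  | nil =>
    intro _ s acc
    exact ⟨[], by simp, List.Sublist.refl [], by simp⟩
  | cons h tl ih =>
    intro hp s acc
    obtain ⟨hh, htl⟩ := List.pairwise_cons.mp hp
    rw [List.foldl_cons]
    by_cases hs : h.2.1 ∈ s
    · have hst : pvFilterStep (s, acc) h = (s, acc) := by
        simp [pvFilterStep, PySem.Set.contains, hs]
      rw [hst]
      obtain ⟨g, hg1, hg2, hg3⟩ := ih htl s acc
      refine ⟨g, hg1, hg2.cons _, ?_⟩
      intro t
      rw [hg3 t]
      constructor
      · rintro ⟨ht1, ht2, ht3⟩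
        refine ⟨List.mem_cons_of_mem _ ht1, ht2, ?_⟩
        intro x hx hxe
        rcases List.mem_cons.mp hx with rfl | hx'
        · exact absurd (hxe ▸ hs) ht2
        · exact ht3 x hx' hxe
      · rintro ⟨ht1, ht2, ht3⟩
        rcases List.mem_cons.mp ht1 with rfl | ht1'
        · exact absurd hs ht2
        · exact ⟨ht1', ht2, fun x hx hxe => ht3 x (List.mem_cons_of_mem _ hx) hxe⟩
    · have hst : pvFilterStep (s, acc) h = (PySem.Set.add s h.2.1, acc ++ [h]) := by
        simp [pvFilterStep, PySem.Set.contains, hs]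
      rw [hst]
      obtain ⟨g, hg1, hg2, hg3⟩ := ih htl (PySem.Set.add s h.2.1) (acc ++ [h])
      refine ⟨h :: g, by rw [hg1, List.append_assoc]; rfl, hg2.cons₂ _, ?_⟩
      intro t
      rw [List.mem_cons, hg3 t]
      constructor
      · rintro (rfl | ⟨ht1, ht2, ht3⟩)
        · refine ⟨List.mem_cons_self, hs, ?_⟩
          intro x hx hxe
          rcases List.mem_cons.mp hx with rfl | hx'
          · exact le_refl _
          · exact le_of_lt (hh x hx')
        · rw [PySem.Set.mem_add] at ht2
          push Not at ht2
          refine ⟨List.mem_cons_of_mem _ ht1, ht2.1, ?_⟩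
          intro x hx hxe
          rcases List.mem_cons.mp hx with rfl | hx'
          · exact absurd hxe.symm ht2.2
          · exact ht3 x hx' hxe
      · rintro ⟨ht1, ht2, ht3⟩
        rcases List.mem_cons.mp ht1 with rfl | ht1'
        · exact Or.inl rfl
        · refine Or.inr ⟨ht1', ?_, fun x hx hxe => ht3 x (List.mem_cons_of_mem _ hx) hxe⟩
          rw [PySem.Set.mem_add]
          push Not
          refine ⟨ht2, ?_⟩
          intro he
          have h1 := ht3 h List.mem_cons_self he.symm
          have h2 := hh t ht1'
          exact absurd h1 (not_le.mpr h2)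

-- ===== main glue =====

lemma pv_mem_best_iff (starts ends : List (List Int)) (t : Int × Int × Int × Int) :
    (t ∈ pvTuplesA starts ends ∧
        ∀ x ∈ pvTuplesA starts ends, x.2.1 = t.2.1 → pvKey4 x ≤ pvKey4 t) ↔
      ∃ p : Int, (0 ≤ p ∧ p < (starts.length : Int)) ∧
        ∃ m, pvIsMax3 (pvPairs (PySem.List.pyGetD starts p []) (PySem.List.pyGetD ends p [])) m ∧
          t = pvAddP p m := by
  constructor
  · rintro ⟨ht, hdom⟩
    obtain ⟨p, h0, h1, m, hm, rfl⟩ := (mem_pvTuplesA starts ends t).mp ht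
    refine ⟨p, ⟨h0, h1⟩, m, ⟨hm, ?_⟩, rfl⟩
    intro x hx
    have hx4 : pvAddP p x ∈ pvTuplesA starts ends :=
      (mem_pvTuplesA starts ends _).mpr ⟨p, h0, h1, x, hx, rfl⟩
    exact (pvKey4_le_iff p m x).mp (hdom (pvAddP p x) hx4 rfl)
  · rintro ⟨p, ⟨h0, h1⟩, m, ⟨hmem, hmax⟩, rfl⟩
    refine ⟨(mem_pvTuplesA starts ends _).mpr ⟨p, h0, h1, m, hmem, rfl⟩, ?_⟩
    intro x hx hxe
    obtain ⟨q, hq0, hq1, m', hm', rfl⟩ := (mem_pvTuplesA starts ends x).mp hx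
    have hq : q = p := by simpa [pvAddP] using hxe
    subst hq
    exact (pvKey4_le_iff q m m').mpr (hmax m' hm')

lemma pvEmit_nodup (starts ends : List (List Int)) (p : Int) :
    (pvEmit starts ends p).Nodup := by
  simp only [pvEmit]
  split_ifs
  · split <;> simp
  · simp

lemma pvEmit_tag (starts ends : List (List Int)) (p : Int) (t : Int × Int × Int × Int)
    (h : t ∈ pvEmit starts ends p) : t.2.1 = p := by
  obtain ⟨m, -, rfl⟩ := (mem_pvEmit starts ends p t).mp h
  rfl

lemma pv_main (starts ends : List (List Int)) :
    ((PySem.List.sorted (pvTuplesA starts ends) pvKey4 true).foldl pvFilterStep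
        (PySem.Set.empty, [])).2 =
      PySem.List.sorted ((PySem.List.pyRange 0 (starts.length : Int) 1).foldl
        (pvParaStep starts ends) []) pvKey4 true := by
  have hnd := pvTuplesA_nodup starts ends
  have hperm : (PySem.List.sorted (pvTuplesA starts ends) pvKey4 true).Perm (pvTuplesA starts ends) :=
    PySem.List.sorted_perm _ _ _
  have hndS : (PySem.List.sorted (pvTuplesA starts ends) pvKey4 true).Nodup := hperm.symm.nodup hnd
  have hge : (PySem.List.sorted (pvTuplesA starts ends) pvKey4 true).Pairwise
      (fun a b => pvKey4 b ≤ pvKey4 a) := PySem.List.sorted_pairwise_rev _ _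
  have hgt : (PySem.List.sorted (pvTuplesA starts ends) pvKey4 true).Pairwise
      (fun a b => pvKey4 b < pvKey4 a) := by
    refine (hge.and hndS).imp ?_
    rintro a b ⟨hle, hne⟩
    exact lt_of_le_of_ne hle (fun he => hne (pvKey4_inj b a he).symm)
  obtain ⟨g, hg1, hg2, hg3⟩ := pvFilter_char _ hgt PySem.Set.empty []
  rw [hg1]
  have hbest : (PySem.List.pyRange 0 (starts.length : Int) 1).foldl (pvParaStep starts ends) [] =
      (PySem.List.pyRange 0 (starts.length : Int) 1).flatMap (pvEmit starts ends) := by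
    have hfun : pvParaStep starts ends = fun best p => best ++ pvEmit starts ends p :=
      funext fun b => funext fun p => pvParaStep_eq starts ends b p
    rw [hfun, PySem.List.foldl_append_eq_flatMap]
    rfl
  rw [hbest]
  have hmem : ∀ t, t ∈ g ↔ t ∈ (PySem.List.pyRange 0 (starts.length : Int) 1).flatMap (pvEmit starts ends) := by
    intro t
    rw [hg3 t]
    have hdom_iff : ((∀ x ∈ PySem.List.sorted (pvTuplesA starts ends) pvKey4 true,
        x.2.1 = t.2.1 → pvKey4 x ≤ pvKey4 t) ↔
          ∀ x ∈ pvTuplesA starts ends, x.2.1 = t.2.1 → pvKey4 x ≤ pvKey4 t) := by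
      constructor
      · intro h x hx hx1
        exact h x (hperm.mem_iff.mpr hx) hx1
      · intro h x hx hx1
        exact h x (hperm.mem_iff.mp hx) hx1
    constructor
    · rintro ⟨ht1, -, ht3⟩
      have := (pv_mem_best_iff starts ends t).mp ⟨hperm.mem_iff.mp ht1, hdom_iff.mp ht3⟩
      obtain ⟨p, ⟨h0, h1⟩, m, hm, rfl⟩ := this
      rw [List.mem_flatMap]
      refine ⟨p, ?_, (mem_pvEmit starts ends p _).mpr ⟨m, hm, rfl⟩⟩
      rw [PySem.List.mem_pyRange_one]
      exact ⟨h0, h1⟩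
    · intro ht
      obtain ⟨p, hp, hte⟩ := List.mem_flatMap.mp ht
      rw [PySem.List.mem_pyRange_one] at hp
      obtain ⟨m, hm, rfl⟩ := (mem_pvEmit starts ends p _).mp hte
      have := (pv_mem_best_iff starts ends _).mpr ⟨p, hp, m, hm, rfl⟩
      exact ⟨hperm.mem_iff.mpr this.1, by simp [PySem.Set.empty], hdom_iff.mpr this.2⟩
  have hgnd : g.Nodup := hg2.nodup hndS
  have hfnd : ((PySem.List.pyRange 0 (starts.length : Int) 1).flatMap (pvEmit starts ends)).Nodup :=
    pvNodup_flatMap _ _ (fun t => t.2.1) (PySem.List.nodup_pyRange_one _ _)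
      (pvEmit_nodup starts ends) (fun p _ x hx => pvEmit_tag starts ends p x hx)
  have hpermg : g.Perm ((PySem.List.pyRange 0 (starts.length : Int) 1).flatMap (pvEmit starts ends)) := by
    rw [List.perm_ext_iff_of_nodup hgnd hfnd]
    exact hmem
  have hgtg : g.Pairwise (fun a b => pvKey4 b < pvKey4 a) := hgt.sublist hg2
  rw [List.nil_append]
  exact (PySem.List.sorted_rev_eq_of_perm_of_pairwise_gt _ _ _ hpermg hgtg).symm

-- ===== VERDICT (by name: the statement is the Claim_ definition above) =====
theorem top_spans_spec : Claim_equal_top_spans := by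
  intro starts ends n _ _
  unfold Spec_top_spans top_spans top_spans_alt
  rw [pv_main starts ends]
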